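-- pv_equiv track=rewrite | github.com/alexandraback/datacollection | solutions_5636311922769920_1/Python/romd/fractals.py | do_case
-- ===== SOURCE A (Python) =====
-- import math
--
-- def do_case(parsed_input):
--         k=parsed_input[0]
--         c=parsed_input[1]
--         s=parsed_input[2]
--         if(s*c<k):
--                 return "IMPOSSIBLE"
--         results=""
--         for i in range(int(math.ceil(k/c))):
--                 check=1
--                 for j in range(c):
--                         t=(i*c+j)%k
--                         check+=pow(k,j)*t
--                 results=results+str(check)+" "
--         return str(results[:-1])
-- ===== SOURCE B (Python) =====
-- import math
--
-- def do_case(parsed_input):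
--     k = parsed_input[0]
--     c = parsed_input[1]
--     s = parsed_input[2]
--     if s * c < k:
--         return "IMPOSSIBLE"
--     rows = int(math.ceil(k / c))
--     parts = []
--     t = 0      # running residue step % k, maintained incrementally
--     check = 1  # running value of the current row
--     p = 1      # running power of k within the current row
--     for step in range(rows * c):
--         check += p * t
--         p *= k
--         t += 1
--         if t == k:
--             t = 0
--         if step % c == c - 1:
--             parts.append(str(check))
--             check = 1
--             p = 1
--     return " ".join(parts)
-- ===== Notes on version B (the rewrite author's own statement) =====
-- stated objective: faster
-- what changed: The nested row/digit loops with a fresh pow(k,j) and a big-product (i*c+j)%k per digit are replaced by one flat pass over all rows*c positions that maintains three running accumulators (residue t incremented mod k, power p *= k, row value check += p*t) and flushes a finished row whenever step % c == c-1; output is assembled with ' '.join over a parts list instead of concatenation-plus-trim.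
-- outside the precondition, e.g. on do_case([-4, -2, 1]): A returns '1 1', B returns ''; on do_case([0, 0, 5]): A raises ZeroDivisionError, B raises ZeroDivisionError; on do_case([4, 3]): A raises IndexError, B raises IndexError
import Mathlib
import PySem

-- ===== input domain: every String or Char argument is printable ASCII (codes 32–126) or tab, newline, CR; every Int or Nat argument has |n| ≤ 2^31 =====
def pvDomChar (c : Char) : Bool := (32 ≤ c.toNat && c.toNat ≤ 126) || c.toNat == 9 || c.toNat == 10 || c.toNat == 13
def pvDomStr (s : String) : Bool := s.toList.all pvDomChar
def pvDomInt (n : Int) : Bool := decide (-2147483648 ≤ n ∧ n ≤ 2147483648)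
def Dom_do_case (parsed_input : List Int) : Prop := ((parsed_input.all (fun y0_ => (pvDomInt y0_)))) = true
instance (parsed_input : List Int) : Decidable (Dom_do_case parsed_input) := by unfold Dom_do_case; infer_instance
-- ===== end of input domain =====

-- B replaces A's nested row/digit loops (fresh pow(k,j) and a big-product % k per digit) by ONE flat
-- pass over all rows*c positions with three running accumulators, and assembles output with " ".join.

-- ===== PORT A =====
-- int(math.ceil(k/c)) ported as the exact integer ceiling -((-k)//c): exact on Dom, where
-- |k|,|c| ≤ 2^31 < 2^53 keeps the float quotient's error below the gap 1/|c| to the next integer.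
-- A's inner loop (the row value 'check') is the named helper aRowA.
def aRowA (k c i : Int) : Int :=
  (PySem.List.pyRange 0 c 1).foldl (fun check j =>
    let t := PySem.Int.mod (i * c + j) k
    check + k ^ j.toNat * t) 1          -- pow(k, j): j ≥ 0 in range(c), so k ^ j.toNat is exact

def do_case (parsed_input : List Int) : String :=
  let k := PySem.List.pyGetD parsed_input 0 0
  let c := PySem.List.pyGetD parsed_input 1 0
  let s := PySem.List.pyGetD parsed_input 2 0
  if s * c < k then "IMPOSSIBLE"
  else
    let results : List Char :=
      (PySem.List.pyRange 0 (-(PySem.Int.floordiv (-k) c)) 1).foldl (fun results i =>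
        results ++ (PySem.Int.toChars (aRowA k c i) ++ [' '])) []
    String.ofList results.dropLast      -- str(results[:-1])

-- ===== PORT B =====
-- one step of B's flat loop; state = (parts, t, check, p)
def bStep (k c : Int) (st : List (List Char) × Int × Int × Int) (step : Int) :
    List (List Char) × Int × Int × Int :=
  let parts := st.1
  let t := st.2.1
  let check := st.2.2.1
  let p := st.2.2.2
  let check := check + p * t
  let p := p * k
  let t := t + 1
  let t := if t = k then 0 else t
  if PySem.Int.mod step c = c - 1 then (parts ++ [PySem.Int.toChars check], t, 1, 1)
  else (parts, t, check, p)

def do_case_alt (parsed_input : List Int) : String :=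
  let k := PySem.List.pyGetD parsed_input 0 0
  let c := PySem.List.pyGetD parsed_input 1 0
  let s := PySem.List.pyGetD parsed_input 2 0
  if s * c < k then "IMPOSSIBLE"
  else
    let rows := -(PySem.Int.floordiv (-k) c)    -- int(math.ceil(k/c)), exact on Dom (see above)
    let st := (PySem.List.pyRange 0 (rows * c) 1).foldl (bStep k c) ([], 0, 1, 1)
    String.ofList (PySem.Chars.join [' '] st.1) -- " ".join(parts)

-- ===== PRECONDITION & SPEC =====
-- Pre_ restricts to the natural domain of the problem, k ≥ 1 or c ≥ 1 (with three list entries):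
-- it excludes A's crashes (IndexError on fewer than 3 entries; ZeroDivisionError in k/c when
-- c = 0 with k ≤ 0) and the degenerate inputs with k ≤ 0 and c < 0, outside the problem's
-- domain, where A's empty inner loop emits a bare '1' per row.
def Pre_do_case (parsed_input : List Int) : Prop :=
  3 ≤ parsed_input.length ∧
  (1 ≤ PySem.List.pyGetD parsed_input 0 0 ∨ 1 ≤ PySem.List.pyGetD parsed_input 1 0)
instance (parsed_input : List Int) : Decidable (Pre_do_case parsed_input) := by
  unfold Pre_do_case; infer_instance
def pvWitness_do_case : List Int := [4, 3, 2]
def Spec_do_case (parsed_input : List Int) (out : String) : Prop := out = do_case_alt parsed_input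
instance (parsed_input : List Int) (out : String) : Decidable (Spec_do_case parsed_input out) := by unfold Spec_do_case; infer_instance

-- ===== CLAIM (what is proved, stated in full; the proofs are below) =====
def Claim_equal_do_case : Prop := ∀ (parsed_input : List Int), Dom_do_case parsed_input → Pre_do_case parsed_input → Spec_do_case parsed_input (do_case parsed_input)

-- ===== LEMMAS AND PROOFS =====

-- incrementing the running residue with wrap equals the residue of the successor
theorem pv_mod_succ (k s : Int) (hk : 1 ≤ k) :
    (if PySem.Int.mod s k + 1 = k then 0 else PySem.Int.mod s k + 1) = PySem.Int.mod (s + 1) k := by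
  rw [PySem.Int.mod_eq_emod_of_pos (by omega : (0:Int) < k),
      PySem.Int.mod_eq_emod_of_pos (by omega : (0:Int) < k)]
  have h2 : (s + 1) % k = (s % k + 1) % k := by
    conv_lhs => rw [show s + 1 = s % k + 1 + k * (s / k) from by
      have := Int.mul_ediv_add_emod s k; omega]
    rw [Int.add_mul_emod_self_left]
  rw [h2]
  have h0 : 0 ≤ s % k := Int.emod_nonneg s (by omega)
  have h1 : s % k < k := Int.emod_lt_of_pos s (by omega)
  by_cases h : s % k + 1 = k
  · rw [if_pos h, h, Int.emod_self]
  · rw [if_neg h,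
        show (s % k + 1) % k = s % k + 1 from Int.emod_eq_of_lt (by omega) (by omega)]

-- the flush test inside a row: (i*c + j) % c = j for 0 ≤ j < c
theorem pv_mod_row (c i j : Int) (h0 : 0 ≤ j) (h1 : j < c) :
    PySem.Int.mod (i * c + j) c = j := by
  rw [PySem.Int.mod_eq_emod_of_pos (by omega)]
  rw [add_comm, mul_comm, Int.add_mul_emod_self_left]
  exact Int.emod_eq_of_lt h0 h1

-- one row of B's flat loop, from the middle of the row (position i*c + j) to its flush
theorem pv_inner (k c : Int) (hk : 1 ≤ k) (_hc : 1 ≤ c) (i : Int) :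
    ∀ (n : Nat) (j : Int), 0 ≤ j → j + n = c → 1 ≤ n →
    ∀ (parts : List (List Char)) (ch : Int),
    (PySem.List.pyRange (i * c + j) (i * c + c) 1).foldl (bStep k c)
      (parts, PySem.Int.mod (i * c + j) k, ch, k ^ j.toNat)
    = (parts ++ [PySem.Int.toChars ((PySem.List.pyRange j c 1).foldl (fun check m =>
          check + k ^ m.toNat * PySem.Int.mod (i * c + m) k) ch)],
       PySem.Int.mod ((i + 1) * c) k, 1, 1) := by
  intro n
  induction n with
  | zero => intro j _ _ h; exact absurd h (by omega)
  | succ n ih =>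
    intro j hj0 hjn _ parts ch
    have hjn' : j + 1 + (n : Int) = c := by push_cast at hjn ⊢; omega
    by_cases hn : n = 0
    · -- last position of the row: j = c - 1, the flush fires
      subst hn
      have hj : j + 1 = c := by omega
      rw [show PySem.List.pyRange (i * c + j) (i * c + c) = [i * c + j] from by
        rw [show i * c + c = (i * c + j) + 1 from by omega]
        exact PySem.List.pyRange_one_singleton _]
      rw [show PySem.List.pyRange j c = [j] from by
        rw [show c = j + 1 from by omega]
        exact PySem.List.pyRange_one_singleton _]
      simp only [List.foldl_cons, List.foldl_nil, bStep]
      rw [pv_mod_row c i j hj0 (by omega)]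
      rw [if_pos (by omega : j = c - 1)]
      rw [pv_mod_succ k (i * c + j) hk]
      have he3 : i * c + j + 1 = (i + 1) * c := by
        have : (i + 1) * c = i * c + c := by ring
        omega
      rw [he3]
    · -- middle of the row: no flush, the three accumulators advance
      have hn1 : 1 ≤ n := by omega
      rw [PySem.List.pyRange_one_cons (show i * c + j < i * c + c by omega)]
      simp only [List.foldl_cons, bStep]
      rw [pv_mod_row c i j hj0 (by omega)]
      rw [if_neg (show ¬ (j = c - 1) by omega)]
      rw [pv_mod_succ k (i * c + j) hk]
      have hp : k ^ j.toNat * k = k ^ (j + 1).toNat := by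
        have : (j + 1).toNat = j.toNat + 1 := by omega
        rw [this, pow_succ]
      have ha : i * c + j + 1 = i * c + (j + 1) := by ring
      rw [hp, ha]
      rw [ih (j + 1) (by omega) (by omega) (by omega) parts
            (ch + k ^ j.toNat * PySem.Int.mod (i * c + j) k)]
      rw [PySem.List.pyRange_one_cons (show j < c by omega)]
      simp only [List.foldl_cons]

-- B's flat loop over n whole rows starting at row i
theorem pv_outer (k c : Int) (hk : 1 ≤ k) (_hc : 1 ≤ c) :
    ∀ (n : Nat) (i : Int), ∀ (parts : List (List Char)),
    (PySem.List.pyRange (i * c) ((i + n) * c) 1).foldl (bStep k c)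
      (parts, PySem.Int.mod (i * c) k, 1, 1)
    = (parts ++ (PySem.List.pyRange i (i + n) 1).map (fun ii => PySem.Int.toChars (aRowA k c ii)),
       PySem.Int.mod ((i + n) * c) k, 1, 1) := by
  intro n
  induction n with
  | zero =>
    intro i parts
    simp only [Nat.cast_zero, add_zero]
    rw [PySem.List.pyRange_one_eq_nil (le_refl (i * c)),
        PySem.List.pyRange_one_eq_nil (le_refl i)]
    simp
  | succ n ih =>
    intro i parts
    have hcast : ((n + 1 : Nat) : Int) = (n : Int) + 1 := by push_cast; ring
    rw [hcast]
    have hb1 : i * c ≤ (i + 1) * c :=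
      mul_le_mul_of_nonneg_right (by omega) (by omega)
    have hb2 : (i + 1) * c ≤ (i + ((n : Int) + 1)) * c :=
      mul_le_mul_of_nonneg_right (by omega) (by omega)
    rw [PySem.List.pyRange_one_append (i * c) ((i + 1) * c) ((i + ((n : Int) + 1)) * c) hb1 hb2,
        List.foldl_append]
    -- first block: one whole row, by pv_inner at j = 0
    have h1 := pv_inner k c hk _hc i c.toNat 0 (le_refl 0) (by omega) (by omega) parts 1
    simp only [add_zero, Int.toNat_zero, pow_zero] at h1
    have hic : (i + 1) * c = i * c + c := by ring
    rw [hic, h1]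
    -- second block: the remaining n rows, by the induction hypothesis at i + 1
    have hsh : i + ((n : Int) + 1) = (i + 1) + (n : Int) := by ring
    rw [hsh, ← hic, ih (i + 1)]
    -- reassemble the row list
    rw [show (i + 1) + (n : Int) = i + ((n : Int) + 1) by ring]
    rw [PySem.List.pyRange_one_cons (show i < i + ((n : Int) + 1) by omega)]
    simp [aRowA, List.append_assoc]

-- with c < 0 the flush test step % c == c - 1 never fires, so parts never changes
theorem pv_parts_const (k c : Int) (hc : c < 0) :
    ∀ (l : List Int) (st : List (List Char) × Int × Int × Int),
    (l.foldl (bStep k c) st).1 = st.1 := by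
  intro l
  induction l with
  | nil => intro st; rfl
  | cons x xs ih =>
    intro st
    have hb := PySem.Int.mod_neg_bounds x hc
    have hne : PySem.Int.mod x c ≠ c - 1 := by omega
    simp only [List.foldl_cons, ih]
    simp [bStep, hne]

-- appending "<row> " per row and trimming the last char equals " ".join of the rows
theorem pv_join_eq (ps : List (List Char)) :
    (ps.map (fun p => p ++ [' '])).flatten.dropLast = PySem.Chars.join [' '] ps := by
  induction ps with
  | nil => simp [PySem.Chars.join, List.intercalate]
  | cons p ps ih =>
    cases ps with
    | nil => simp [PySem.Chars.join, List.intercalate]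
    | cons q qs =>
      have h2 : (((q :: qs).map (fun p => p ++ [' '])).flatten : List Char) ≠ [] := by simp
      have h1 : ([' '] ++ ((q :: qs).map (fun p => p ++ [' '])).flatten : List Char) ≠ [] := by
        simp
      rw [List.map_cons, List.flatten_cons, List.append_assoc,
          List.dropLast_append_of_ne_nil h1, List.dropLast_append_of_ne_nil h2, ih,
          PySem.Chars.join_cons_cons]
      simp

-- ===== VERDICT (by name: the statement is the Claim_ definition above) =====
theorem do_case_spec : Claim_equal_do_case := by
  intro parsed_input _ hpre
  obtain ⟨hlen, hkc⟩ := hpre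
  unfold Spec_do_case do_case do_case_alt
  simp only []
  set k := PySem.List.pyGetD parsed_input 0 0 with hk
  set c := PySem.List.pyGetD parsed_input 1 0 with hc
  set s := PySem.List.pyGetD parsed_input 2 0 with hs
  split
  · rfl
  · rename_i hguard
    set R := -(PySem.Int.floordiv (-k) c) with hR
    by_cases hc1 : 1 ≤ c
    · by_cases hk1 : 1 ≤ k
      · -- main case: k ≥ 1, c ≥ 1
        have hR0 : 0 ≤ R := by
          rw [hR, PySem.Int.floordiv_eq_ediv_of_pos (by omega : (0:Int) < c)]
          have : (-k) / c < 0 := Int.ediv_neg_of_neg_of_pos (by omega) (by omega)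
          omega
        have h1 := pv_outer k c hk1 hc1 R.toNat 0 []
        have hcast : ((R.toNat : Int)) = R := Int.toNat_of_nonneg hR0
        rw [hcast] at h1
        simp only [zero_mul, zero_add] at h1
        have hmod0 : PySem.Int.mod 0 k = 0 := by
          rw [PySem.Int.mod_eq_emod_of_pos (by omega)]; simp
        rw [hmod0] at h1
        rw [h1]
        rw [PySem.List.foldl_append_eq_flatMap (fun i => PySem.Int.toChars (aRowA k c i) ++ [' '])]
        simp only [List.nil_append, List.flatMap_def]
        have hmaps : (fun i => PySem.Int.toChars (aRowA k c i) ++ ([' '] : List Char))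
            = (fun p => p ++ [' ']) ∘ (fun i => PySem.Int.toChars (aRowA k c i)) := rfl
        rw [hmaps, ← List.map_map, pv_join_eq]
      · -- k ≤ 0, c ≥ 1: no rows on either side
        have hR0 : R ≤ 0 := by
          rw [hR, PySem.Int.floordiv_eq_ediv_of_pos (by omega : (0:Int) < c)]
          have : 0 ≤ (-k) / c := Int.ediv_nonneg (by omega) (by omega)
          omega
        rw [PySem.List.pyRange_one_eq_nil (by omega : R ≤ 0),
            PySem.List.pyRange_one_eq_nil (by nlinarith : R * c ≤ 0)]
        simp [PySem.Chars.join_nil]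
    · -- c ≤ 0, so k ≥ 1 by Pre_; c = 0 is impossible under ¬guard
      have hk1 : 1 ≤ k := by omega
      have hcneg : c < 0 := by
        rcases lt_or_eq_of_le (by omega : c ≤ 0) with h | h
        · exact h
        · exfalso; apply hguard; rw [h]; simpa using hk1
      have hR0 : R ≤ 0 := by
        rw [hR, ← neg_neg c, PySem.Int.floordiv_neg_neg,
            PySem.Int.floordiv_eq_ediv_of_pos (by omega : (0:Int) < -c)]
        have : 0 ≤ k / (-c) := Int.ediv_nonneg (by omega) (by omega)
        omega
      rw [PySem.List.pyRange_one_eq_nil (by omega : R ≤ 0)]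
      rw [pv_parts_const k c hcneg]
      simp [PySem.Chars.join_nil]
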